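-- pv_equiv track=rewrite | github.com/Lospub/-Computational-Cryptography | IMC and Vegenere/test.py | getPossibleSubSequences
-- ===== SOURCE A (Python) =====
-- LETTERS = 'ABCDEFGHIJKLMNOPQRSTUVWXYZ'
--
-- def getPossibleSubSequences(message):
-- #function:
-- #           get possible sequences for each letter
-- #parameter (message):
-- #           given a letter message
-- #return:
-- #           a list of possible ciphers by each letter.
--     messages = []
--     for key in range(len(LETTERS)):
--         text = ''
--         for c in message:
--             idx = LETTERS.find(c)
--             text += LETTERS[(idx - key) % 26]     #shiff left
--         messages.append(text)
--     return messages
-- ===== SOURCE B (Python) =====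
-- LETTERS = 'ABCDEFGHIJKLMNOPQRSTUVWXYZ'
--
-- def getPossibleSubSequences(message):
--     # One pass over the message filling 26 buffers (one per key),
--     # computing LETTERS.find(c) once per character instead of 26 times.
--     bufs = [[] for _ in range(26)]
--     for c in message:
--         idx = LETTERS.find(c)
--         for key, buf in enumerate(bufs):
--             buf.append(LETTERS[(idx - key) % 26])
--     return [''.join(b) for b in bufs]
-- ===== Notes on version B (the rewrite author's own statement) =====
-- stated objective: alternative
-- what changed: Transposed the loops: instead of 26 full rescans of the message (one per key), B makes a single pass over the message, computes LETTERS.find(c) once per character, and appends the shifted letter to each of 26 per-key buffers, joining them at the end.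
import Mathlib
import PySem

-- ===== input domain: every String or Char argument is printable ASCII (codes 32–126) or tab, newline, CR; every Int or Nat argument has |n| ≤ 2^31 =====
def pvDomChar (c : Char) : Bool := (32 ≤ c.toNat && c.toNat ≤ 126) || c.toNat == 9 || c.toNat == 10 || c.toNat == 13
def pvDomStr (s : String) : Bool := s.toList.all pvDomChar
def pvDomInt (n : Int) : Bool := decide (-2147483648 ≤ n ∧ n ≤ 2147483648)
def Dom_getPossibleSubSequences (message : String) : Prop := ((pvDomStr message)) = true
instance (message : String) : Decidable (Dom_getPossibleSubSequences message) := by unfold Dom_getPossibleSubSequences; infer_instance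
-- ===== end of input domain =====

-- B replaces A's 26 rescans of the message by one pass that fills 26 per-key buffers
-- (one LETTERS.find per character instead of 26); same results, proved equal on all inputs.

def gpsLetters : List Char := "ABCDEFGHIJKLMNOPQRSTUVWXYZ".toList

-- LETTERS[(idx - key) % 26], the shifted letter both Pythons compute
def gpsShift (idx key : Int) : List Char :=
  (PySem.List.pyGet? gpsLetters (PySem.Int.mod (idx - key) 26)).toList

-- ===== PORT A =====
def getPossibleSubSequences (message : String) : List String :=
  (PySem.List.pyRange 0 26 1).foldl
    (fun messages key =>
      messages ++ [String.mk (message.toList.foldl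
        (fun text c => text ++ gpsShift (PySem.Chars.find gpsLetters [c]) key)
        [])])
    []

-- ===== PORT B =====
def getPossibleSubSequences_alt (message : String) : List String :=
  let bufs0 : List (List Char) := (List.range 26).map (fun _ => [])
  let bufs := message.toList.foldl
    (fun bufs c =>
      (PySem.List.enumerate bufs).map
        (fun kb => kb.2 ++ gpsShift (PySem.Chars.find gpsLetters [c]) kb.1))
    bufs0
  bufs.map String.mk

-- ===== PRECONDITION & SPEC =====
def Spec_getPossibleSubSequences (message : String) (out : List String) : Prop := out = getPossibleSubSequences_alt message
instance (message : String) (out : List String) : Decidable (Spec_getPossibleSubSequences message out) := by unfold Spec_getPossibleSubSequences; infer_instance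

-- ===== CLAIM (what is proved, stated in full; the proofs are below) =====
def Claim_equal_getPossibleSubSequences : Prop := ∀ (message : String), Dom_getPossibleSubSequences message → Spec_getPossibleSubSequences message (getPossibleSubSequences message)

-- ===== LEMMAS AND PROOFS =====

theorem foldl_append_singleton {α β : Type} (F : α → β) :
    ∀ (l : List α) (acc : List β),
      l.foldl (fun ms k => ms ++ [F k]) acc = acc ++ l.map F := by
  intro l
  induction l with
  | nil => intro acc; simp
  | cons x xs ih => intro acc; simp [List.foldl, ih]

theorem enum_map_range (n : Nat) (h : Int → List Char → List Char) :
    ∀ (s : Int) (f : Nat → List Char),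
      (PySem.List.enumerate ((List.range n).map f) s).map (fun kb => h kb.1 kb.2)
        = (List.range n).map (fun (k : Nat) => h (s + (k : Int)) (f k)) := by
  induction n with
  | zero => intro s f; simp [PySem.List.enumerate_nil]
  | succ m ih =>
      intro s f
      rw [List.range_succ_eq_map]
      simp only [List.map_cons, List.map_map, PySem.List.enumerate_cons]
      rw [show List.map (f ∘ Nat.succ) (List.range m) = List.map (fun k => f (k + 1)) (List.range m) from rfl]
      rw [ih (s + 1) (fun k => f (k + 1))]
      simp only [Nat.cast_zero, add_zero]
      refine congrArg (h s (f 0) :: ·) ?_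
      apply List.map_congr_left
      intro k hk
      simp only [Function.comp]
      push_cast
      ring_nf
      congr 1
      · congr 1
        omega

theorem bufs_invariant (cs : List Char) :
    ∀ (n : Nat) (f : Nat → List Char),
      cs.foldl
        (fun bufs c =>
          (PySem.List.enumerate bufs).map
            (fun kb => kb.2 ++ gpsShift (PySem.Chars.find gpsLetters [c]) kb.1))
        ((List.range n).map f)
      = (List.range n).map
          (fun k => f k ++ cs.flatMap (fun c => gpsShift (PySem.Chars.find gpsLetters [c]) (k : Int))) := by
  induction cs with
  | nil => intro n f; simp
  | cons c cs ih =>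
      intro n f
      simp only [List.foldl]
      rw [enum_map_range n (fun k b => b ++ gpsShift (PySem.Chars.find gpsLetters [c]) k) 0 f]
      simp only [zero_add]
      rw [ih n (fun k => f k ++ gpsShift (PySem.Chars.find gpsLetters [c]) (k : Int))]
      simp [List.flatMap_cons, List.append_assoc]

-- ===== VERDICT (by name: the statement is the Claim_ definition above) =====
theorem getPossibleSubSequences_spec : Claim_equal_getPossibleSubSequences := by
  unfold Claim_equal_getPossibleSubSequences Spec_getPossibleSubSequences
  intro message _
  unfold getPossibleSubSequences getPossibleSubSequences_alt
  rw [foldl_append_singleton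
        (fun key => String.mk (message.toList.foldl
          (fun text c => text ++ gpsShift (PySem.Chars.find gpsLetters [c]) key) []))]
  dsimp only
  rw [bufs_invariant message.toList 26 (fun _ => [])]
  rw [PySem.List.pyRange_one]
  simp only [List.nil_append, List.map_map]
  norm_num
  apply List.map_congr_left
  intro k hk
  simp only [Function.comp]
  simp [List.flatMap_def]
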